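-- pv_equiv track=rewrite | github.com/David-osb/betyard.net | ml-backend/espn_website_data_service.py | _extract_teams
-- ===== SOURCE A (Python) =====
-- from typing import Dict, List, Any, Optional
--
-- def _extract_teams(content: str) -> List[str]:
--     """Extract team codes from content"""
--     content_lower = content.lower()
--     teams_found = []
--
--     team_mapping = {
--         'cardinals': 'ARI', 'arizona': 'ARI', 'falcons': 'ATL', 'atlanta': 'ATL',
--         'ravens': 'BAL', 'baltimore': 'BAL', 'bills': 'BUF', 'buffalo': 'BUF',
--         'panthers': 'CAR', 'carolina': 'CAR', 'bears': 'CHI', 'chicago': 'CHI',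
--         'bengals': 'CIN', 'cincinnati': 'CIN', 'browns': 'CLE', 'cleveland': 'CLE',
--         'cowboys': 'DAL', 'dallas': 'DAL', 'broncos': 'DEN', 'denver': 'DEN',
--         'lions': 'DET', 'detroit': 'DET', 'packers': 'GB', 'green bay': 'GB',
--         'texans': 'HOU', 'houston': 'HOU', 'colts': 'IND', 'indianapolis': 'IND',
--         'jaguars': 'JAX', 'jacksonville': 'JAX', 'chiefs': 'KC', 'kansas city': 'KC',
--         'raiders': 'LV', 'las vegas': 'LV', 'chargers': 'LAC', 'rams': 'LAR',
--         'dolphins': 'MIA', 'miami': 'MIA', 'vikings': 'MIN', 'minnesota': 'MIN',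
--         'patriots': 'NE', 'new england': 'NE', 'saints': 'NO', 'new orleans': 'NO',
--         'giants': 'NYG', 'jets': 'NYJ', 'eagles': 'PHI', 'philadelphia': 'PHI',
--         'steelers': 'PIT', 'pittsburgh': 'PIT', '49ers': 'SF', 'san francisco': 'SF',
--         'seahawks': 'SEA', 'seattle': 'SEA', 'buccaneers': 'TB', 'tampa bay': 'TB',
--         'titans': 'TEN', 'tennessee': 'TEN', 'commanders': 'WAS', 'washington': 'WAS'
--     }
--
--     for team_name, code in team_mapping.items():
--         if team_name in content_lower and code not in teams_found:
--             teams_found.append(code)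
--
--     return teams_found
-- ===== SOURCE B (Python) =====
-- from typing import Dict, List
--
-- # code -> its trigger aliases, codes in the canonical (first-occurrence) order.
-- _TEAMS: "List[tuple]" = [
--     ('ARI', ['cardinals', 'arizona']), ('ATL', ['falcons', 'atlanta']),
--     ('BAL', ['ravens', 'baltimore']), ('BUF', ['bills', 'buffalo']),
--     ('CAR', ['panthers', 'carolina']), ('CHI', ['bears', 'chicago']),
--     ('CIN', ['bengals', 'cincinnati']), ('CLE', ['browns', 'cleveland']),
--     ('DAL', ['cowboys', 'dallas']), ('DEN', ['broncos', 'denver']),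
--     ('DET', ['lions', 'detroit']), ('GB', ['packers', 'green bay']),
--     ('HOU', ['texans', 'houston']), ('IND', ['colts', 'indianapolis']),
--     ('JAX', ['jaguars', 'jacksonville']), ('KC', ['chiefs', 'kansas city']),
--     ('LV', ['raiders', 'las vegas']), ('LAC', ['chargers']), ('LAR', ['rams']),
--     ('MIA', ['dolphins', 'miami']), ('MIN', ['vikings', 'minnesota']),
--     ('NE', ['patriots', 'new england']), ('NO', ['saints', 'new orleans']),
--     ('NYG', ['giants']), ('NYJ', ['jets']), ('PHI', ['eagles', 'philadelphia']),
--     ('PIT', ['steelers', 'pittsburgh']), ('SF', ['49ers', 'san francisco']),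
--     ('SEA', ['seahawks', 'seattle']), ('TB', ['buccaneers', 'tampa bay']),
--     ('TEN', ['titans', 'tennessee']), ('WAS', ['commanders', 'washington']),
-- ]
--
-- # first character -> the aliases starting with it (a one-level trie for the scan),
-- # in the canonical alias order 'cardinals', 'arizona', 'falcons', 'atlanta', ...
-- _ALIASES = ['cardinals', 'arizona', 'falcons', 'atlanta', 'ravens', 'baltimore',
--             'bills', 'buffalo', 'panthers', 'carolina', 'bears', 'chicago',
--             'bengals', 'cincinnati', 'browns', 'cleveland', 'cowboys', 'dallas',
--             'broncos', 'denver', 'lions', 'detroit', 'packers', 'green bay',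
--             'texans', 'houston', 'colts', 'indianapolis', 'jaguars', 'jacksonville',
--             'chiefs', 'kansas city', 'raiders', 'las vegas', 'chargers', 'rams',
--             'dolphins', 'miami', 'vikings', 'minnesota', 'patriots', 'new england',
--             'saints', 'new orleans', 'giants', 'jets', 'eagles', 'philadelphia',
--             'steelers', 'pittsburgh', '49ers', 'san francisco', 'seahawks',
--             'seattle', 'buccaneers', 'tampa bay', 'titans', 'tennessee',
--             'commanders', 'washington']
-- _BY_FIRST: "Dict[str, List[str]]" = {}
-- for _name in _ALIASES:
--     _BY_FIRST.setdefault(_name[0], []).append(_name)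
--
--
-- def _extract_teams(content: str) -> List[str]:
--     """Extract team codes from content"""
--     text = content.lower()
--     matched = set()
--     # single scan of the text: at each position, try only the aliases that start
--     # with the character found there (multi-pattern prefix matching)
--     for i in range(len(text)):
--         for name in _BY_FIRST.get(text[i], ()):
--             if name not in matched and text.startswith(name, i):
--                 matched.add(name)
--     return [code for code, names in _TEAMS if any(name in matched for name in names)]
-- ===== Notes on version B (the rewrite author's own statement) =====
-- stated objective: alternative
-- what changed: B replaces A's per-alias substring searches over the whole text by one left-to-right scan of the text doing first-character-indexed multi-pattern prefix matching into a set of matched aliases, then emits codes from a pre-grouped code-to-aliases table, so A's dedup scan of the result list disappears.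
import Mathlib
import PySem

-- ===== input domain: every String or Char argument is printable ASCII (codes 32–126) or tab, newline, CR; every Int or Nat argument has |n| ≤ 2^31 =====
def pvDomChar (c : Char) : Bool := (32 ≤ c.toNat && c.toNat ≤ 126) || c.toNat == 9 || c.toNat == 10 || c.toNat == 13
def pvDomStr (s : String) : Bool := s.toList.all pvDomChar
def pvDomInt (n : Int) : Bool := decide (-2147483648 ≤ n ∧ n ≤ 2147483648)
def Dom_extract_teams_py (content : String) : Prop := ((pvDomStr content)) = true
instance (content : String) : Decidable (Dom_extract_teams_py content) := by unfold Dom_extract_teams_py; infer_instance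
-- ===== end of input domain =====

-- B replaces A's per-name substring searches by one left-to-right scan of the text (a
-- first-character-indexed multi-pattern prefix matcher collecting matched aliases into a set)
-- followed by a grouped code-emission pass (alternative algorithm, same result).


-- ===== PORT A =====
-- A's dict literal, as the association list it iterates (insertion order; all keys distinct).
def teamMapping : List (String × String) :=
  [("cardinals", "ARI"), ("arizona", "ARI"), ("falcons", "ATL"), ("atlanta", "ATL"),
   ("ravens", "BAL"), ("baltimore", "BAL"), ("bills", "BUF"), ("buffalo", "BUF"),
   ("panthers", "CAR"), ("carolina", "CAR"), ("bears", "CHI"), ("chicago", "CHI"),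
   ("bengals", "CIN"), ("cincinnati", "CIN"), ("browns", "CLE"), ("cleveland", "CLE"),
   ("cowboys", "DAL"), ("dallas", "DAL"), ("broncos", "DEN"), ("denver", "DEN"),
   ("lions", "DET"), ("detroit", "DET"), ("packers", "GB"), ("green bay", "GB"),
   ("texans", "HOU"), ("houston", "HOU"), ("colts", "IND"), ("indianapolis", "IND"),
   ("jaguars", "JAX"), ("jacksonville", "JAX"), ("chiefs", "KC"), ("kansas city", "KC"),
   ("raiders", "LV"), ("las vegas", "LV"), ("chargers", "LAC"), ("rams", "LAR"),
   ("dolphins", "MIA"), ("miami", "MIA"), ("vikings", "MIN"), ("minnesota", "MIN"),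
   ("patriots", "NE"), ("new england", "NE"), ("saints", "NO"), ("new orleans", "NO"),
   ("giants", "NYG"), ("jets", "NYJ"), ("eagles", "PHI"), ("philadelphia", "PHI"),
   ("steelers", "PIT"), ("pittsburgh", "PIT"), ("49ers", "SF"), ("san francisco", "SF"),
   ("seahawks", "SEA"), ("seattle", "SEA"), ("buccaneers", "TB"), ("tampa bay", "TB"),
   ("titans", "TEN"), ("tennessee", "TEN"), ("commanders", "WAS"), ("washington", "WAS")]

-- 'for team_name, code in team_mapping.items(): if team_name in content_lower and code not in teams_found: teams_found.append(code)'
def extract_teams_py (content : String) : List String :=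
  let content_lower := PySem.Str.lower content
  teamMapping.foldl
    (fun teams_found p =>
      if PySem.Str.isIn p.1 content_lower = true ∧ p.2 ∉ teams_found
      then teams_found ++ [p.2] else teams_found)
    []

-- ===== PORT B =====
-- B's grouped table _TEAMS: code -> its trigger aliases, codes in canonical order.
def teamGroups : List (String × List String) :=
  [("ARI", ["cardinals", "arizona"]), ("ATL", ["falcons", "atlanta"]),
   ("BAL", ["ravens", "baltimore"]), ("BUF", ["bills", "buffalo"]),
   ("CAR", ["panthers", "carolina"]), ("CHI", ["bears", "chicago"]),
   ("CIN", ["bengals", "cincinnati"]), ("CLE", ["browns", "cleveland"]),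
   ("DAL", ["cowboys", "dallas"]), ("DEN", ["broncos", "denver"]),
   ("DET", ["lions", "detroit"]), ("GB", ["packers", "green bay"]),
   ("HOU", ["texans", "houston"]), ("IND", ["colts", "indianapolis"]),
   ("JAX", ["jaguars", "jacksonville"]), ("KC", ["chiefs", "kansas city"]),
   ("LV", ["raiders", "las vegas"]), ("LAC", ["chargers"]), ("LAR", ["rams"]),
   ("MIA", ["dolphins", "miami"]), ("MIN", ["vikings", "minnesota"]),
   ("NE", ["patriots", "new england"]), ("NO", ["saints", "new orleans"]),
   ("NYG", ["giants"]), ("NYJ", ["jets"]), ("PHI", ["eagles", "philadelphia"]),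
   ("PIT", ["steelers", "pittsburgh"]), ("SF", ["49ers", "san francisco"]),
   ("SEA", ["seahawks", "seattle"]), ("TB", ["buccaneers", "tampa bay"]),
   ("TEN", ["titans", "tennessee"]), ("WAS", ["commanders", "washington"])]

-- B's table _BY_FIRST: first character -> the aliases starting with it (built once at import).
def byFirst : PySem.Dict Char (List String) :=
  PySem.Dict.mk
  [('c', ["cardinals", "carolina", "chicago", "cincinnati", "cleveland", "cowboys", "colts", "chiefs", "chargers", "commanders"]),
   ('a', ["arizona", "atlanta"]),
   ('f', ["falcons"]),
   ('r', ["ravens", "raiders", "rams"]),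
   ('b', ["baltimore", "bills", "buffalo", "bears", "bengals", "browns", "broncos", "buccaneers"]),
   ('p', ["panthers", "packers", "patriots", "philadelphia", "pittsburgh"]),
   ('d', ["dallas", "denver", "detroit", "dolphins"]),
   ('l', ["lions", "las vegas"]),
   ('g', ["green bay", "giants"]),
   ('t', ["texans", "tampa bay", "titans", "tennessee"]),
   ('h', ["houston"]),
   ('i', ["indianapolis"]),
   ('j', ["jaguars", "jacksonville", "jets"]),
   ('k', ["kansas city"]),
   ('m', ["miami", "minnesota"]),
   ('v', ["vikings"]),
   ('n', ["new england", "new orleans"]),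
   ('s', ["saints", "steelers", "san francisco", "seahawks", "seattle"]),
   ('e', ["eagles"]),
   ('4', ["49ers"]),
   ('w', ["washington"])]

-- B's inner loop at one text position i: 'for name in _BY_FIRST.get(text[i], ()):
--   if name not in matched and text.startswith(name, i): matched.add(name)'.
-- text[i] is ported as 'text.getD i ' '' — exact, since the scan only visits i < len(text);
-- text.startswith(name, i) is PySem.Chars.startswith on the i-suffix (exact for 0 ≤ i).
def scanPos (text : List Char) (matched : PySem.Set String) (i : Nat) : PySem.Set String :=
  (PySem.Dict.getD byFirst (text.getD i ' ') []).foldl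
    (fun matched name =>
      if ¬ PySem.Set.contains matched name = true ∧
         PySem.Chars.startswith (text.drop i) name.toList = true
      then PySem.Set.add matched name else matched)
    matched

-- 'for i in range(len(text)): …' then the grouped comprehension over _BY_CODE.
def extract_teams_py_alt (content : String) : List String :=
  let text := (PySem.Str.lower content).toList
  let matched := (List.range text.length).foldl (scanPos text) PySem.Set.empty
  teamGroups.filterMap
    (fun g => if g.2.any (fun name => PySem.Set.contains matched name) then some g.1 else none)

-- ===== PRECONDITION & SPEC =====
def Spec_extract_teams_py (content : String) (out : List String) : Prop := out = extract_teams_py_alt content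
instance (content : String) (out : List String) : Decidable (Spec_extract_teams_py content out) := by unfold Spec_extract_teams_py; infer_instance

-- ===== CLAIM (what is proved, stated in full; the proofs are below) =====
def Claim_equal_extract_teams_py : Prop := ∀ (content : String), Dom_extract_teams_py content → Spec_extract_teams_py content (extract_teams_py content)

-- ===== LEMMAS AND PROOFS =====

-- The 58 trigger names, in A's dict order.
def trigNames : List String := teamMapping.map Prod.fst

-- A's loop body, abstracted over the matched-name predicate m.
def stepA (m : String → Bool) (acc : List String) (p : String × String) : List String :=
  if m p.1 = true ∧ p.2 ∉ acc then acc ++ [p.2] else acc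

-- The flat pair list a group contributes.
def pairsOf (g : String × List String) : List (String × String) := g.2.map (fun n => (n, g.1))

-- Once the code is already in the accumulator, the rest of its group is a no-op.
theorem foldA_group_skip (m : String → Bool) (c : String) (ns : List String)
    (acc : List String) (h : c ∈ acc) :
    (ns.map (fun n => (n, c))).foldl (stepA m) acc = acc := by
  induction ns with
  | nil => rfl
  | cons n ns ih => simp [stepA, h, ih]

-- One group folds to 'append the code iff some name matches', given the code is fresh.
theorem foldA_group (m : String → Bool) (c : String) (ns : List String)
    (acc : List String) (h : c ∉ acc) :
    (ns.map (fun n => (n, c))).foldl (stepA m) acc =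
      if ns.any m then acc ++ [c] else acc := by
  induction ns with
  | nil => simp
  | cons n ns ih =>
    by_cases hm : m n = true
    · have hs : stepA m acc (n, c) = acc ++ [c] := by simp [stepA, hm, h]
      simp only [List.map_cons, List.foldl_cons, hs, List.any_cons, hm, Bool.true_or, if_true]
      exact foldA_group_skip m c ns (acc ++ [c]) (by simp)
    · have hs : stepA m acc (n, c) = acc := by simp [stepA, hm]
      simp only [List.map_cons, List.foldl_cons, hs, List.any_cons, hm, Bool.false_or]
      exact ih

-- A's fold over the flattened groups equals the grouped comprehension,
-- provided the pending group codes are distinct and absent from the accumulator.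
theorem foldA_groups (m : String → Bool) (gs : List (String × List String))
    (acc : List String)
    (hn : (gs.map Prod.fst).Nodup) (ha : ∀ g ∈ gs, g.1 ∉ acc) :
    (gs.flatMap pairsOf).foldl (stepA m) acc =
      acc ++ gs.filterMap (fun g => if g.2.any m then some g.1 else none) := by
  induction gs generalizing acc with
  | nil => simp
  | cons g gs ih =>
    simp only [List.map_cons, List.nodup_cons] at hn
    have hfresh : g.1 ∉ acc := ha g (by simp)
    simp only [List.flatMap_cons, List.foldl_append, pairsOf]
    rw [foldA_group m g.1 g.2 acc hfresh]
    by_cases hm : g.2.any m = true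
    · rw [if_pos hm, ih (acc ++ [g.1]) hn.2 ?_, List.filterMap_cons, if_pos hm,
        List.append_assoc, List.singleton_append]
      intro g' hg'
      simp only [List.mem_append, List.mem_singleton]
      rintro (h1 | h2)
      · exact ha g' (List.mem_cons_of_mem _ hg') h1
      · exact hn.1 (h2 ▸ List.mem_map_of_mem hg')
    · rw [if_neg hm, ih acc hn.2 (fun g' hg' => ha g' (List.mem_cons_of_mem _ hg')),
        List.filterMap_cons, if_neg hm]

-- The flattened grouped table is exactly A's dict, in order.
theorem flat_groups : teamGroups.flatMap pairsOf = teamMapping := by decide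

-- The 32 codes are pairwise distinct.
theorem codes_nodup : (teamGroups.map Prod.fst).Nodup := by decide

-- Every name in a group is a trigger name.
theorem groups_names_sub : ∀ g ∈ teamGroups, ∀ n ∈ g.2, n ∈ trigNames := by decide

-- Trigger names are nonempty.
theorem trigNames_ne : ∀ n ∈ trigNames, n.toList ≠ [] := by decide

-- _BY_FIRST is complete: every trigger name is listed under its first character.
theorem byFirst_complete : ∀ n ∈ trigNames,
    n ∈ PySem.Dict.getD byFirst (n.toList.headD ' ') [] := by decide

-- One step of the inner pass: the candidate name is added exactly when its prefix
-- test succeeds (the 'not in matched' guard only skips a redundant re-add).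
theorem mem_inner_step (sw : String → Bool) (s : PySem.Set String) (m n : String) :
    n ∈ (if ¬ PySem.Set.contains s m = true ∧ sw m = true
         then PySem.Set.add s m else s) ↔
      n ∈ s ∨ (n = m ∧ sw m = true) := by
  split_ifs with h
  · rw [PySem.Set.mem_add]
    constructor
    · rintro (h1 | h1)
      · exact Or.inl h1
      · exact Or.inr ⟨h1, h.2⟩
    · rintro (h1 | ⟨h1, _⟩)
      · exact Or.inl h1
      · exact Or.inr h1
  · by_cases hw : sw m = true
    · have hm : m ∈ s := (PySem.Set.contains_iff s m).mp (by
        by_contra hc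
        exact h ⟨fun h' => hc h', hw⟩)
      constructor
      · exact Or.inl
      · rintro (h1 | ⟨rfl, _⟩)
        · exact h1
        · exact hm
    · constructor
      · exact Or.inl
      · rintro (h1 | ⟨_, h2⟩)
        · exact h1
        · exact absurd h2 hw
-- One inner pass over a candidate list: the names added are exactly those whose
-- prefix test succeeds.
theorem mem_inner_fold (sw : String → Bool) (ns : List String)
    (s : PySem.Set String) (n : String) :
    n ∈ ns.foldl
        (fun matched name =>
          if ¬ PySem.Set.contains matched name = true ∧ sw name = true
          then PySem.Set.add matched name else matched) s ↔
      n ∈ s ∨ (n ∈ ns ∧ sw n = true) := by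
  induction ns generalizing s with
  | nil => simp
  | cons m ms ih =>
    rw [List.foldl_cons, ih, mem_inner_step sw s m n]
    constructor
    · rintro ((h | ⟨rfl, hw⟩) | ⟨h, hw⟩)
      · exact Or.inl h
      · exact Or.inr ⟨List.mem_cons_self, hw⟩
      · exact Or.inr ⟨List.mem_cons_of_mem _ h, hw⟩
    · rintro (h | ⟨h, hw⟩)
      · exact Or.inl (Or.inl h)
      · rcases List.mem_cons.mp h with rfl | h
        · exact Or.inl (Or.inr ⟨rfl, hw⟩)
        · exact Or.inr ⟨h, hw⟩

-- Membership after one scan position.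
theorem mem_scanPos (text : List Char) (s : PySem.Set String) (i : Nat) (n : String) :
    n ∈ scanPos text s i ↔
      n ∈ s ∨ (n ∈ PySem.Dict.getD byFirst (text.getD i ' ') [] ∧
        PySem.Chars.startswith (text.drop i) n.toList = true) := by
  unfold scanPos
  exact mem_inner_fold (fun name => PySem.Chars.startswith (text.drop i) name.toList) _ s n

-- The scan over the first k positions collects exactly the names matching at some i < k.
theorem mem_scan (text : List Char) (k : Nat) (n : String) :
    n ∈ (List.range k).foldl (scanPos text) PySem.Set.empty ↔
      ∃ i < k, n ∈ PySem.Dict.getD byFirst (text.getD i ' ') [] ∧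
        PySem.Chars.startswith (text.drop i) n.toList = true := by
  induction k with
  | zero => simp [PySem.Set.empty]
  | succ k ih =>
    rw [List.range_succ, List.foldl_append, List.foldl_cons, List.foldl_nil,
      mem_scanPos text _ k n, ih]
    constructor
    · rintro (⟨i, hi, h⟩ | h)
      · exact ⟨i, Nat.lt_succ_of_lt hi, h⟩
      · exact ⟨k, Nat.lt_succ_self k, h⟩
    · rintro ⟨i, hi, h⟩
      rcases Nat.lt_succ_iff_lt_or_eq.mp hi with hik | rfl
      · exact Or.inl ⟨i, hik, h⟩
      · exact Or.inr h

-- any over a list only depends on the predicate's values on its members.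
theorem any_congr_mem {α : Type} {l : List α} {p q : α → Bool}
    (h : ∀ a ∈ l, p a = q a) : l.any p = l.any q := by
  induction l with
  | nil => rfl
  | cons a l ih =>
    simp only [List.any_cons, h a List.mem_cons_self,
      ih (fun b hb => h b (List.mem_cons_of_mem _ hb))]

-- For a trigger name, having been collected by the scan is exactly 'name in text'.
theorem scan_matches_isIn (text : List Char) (n : String) (hn : n ∈ trigNames) :
    (∃ i < text.length, n ∈ PySem.Dict.getD byFirst (text.getD i ' ') [] ∧
        PySem.Chars.startswith (text.drop i) n.toList = true) ↔
      PySem.Chars.isIn n.toList text = true := by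
  have hne : n.toList ≠ [] := trigNames_ne n hn
  constructor
  · rintro ⟨i, _, _, hsw⟩
    exact (PySem.Chars.exists_prefix_drop_iff_isIn n.toList text).mp
      ⟨i, (PySem.Chars.startswith_iff _ _).mp hsw⟩
  · intro hin
    obtain ⟨j, hpre⟩ := (PySem.Chars.exists_prefix_drop_iff_isIn n.toList text).mpr hin
    have hdrop_ne : text.drop j ≠ [] := by
      intro h0; exact hne (List.prefix_nil.mp (h0 ▸ hpre))
    have hj : j < text.length := by
      by_contra h; exact hdrop_ne (List.drop_eq_nil_iff.mpr (Nat.le_of_not_lt h))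
    have hhead : (text.drop j).head? = n.toList.head? := by
      obtain ⟨t, ht⟩ := hpre
      obtain ⟨c, cs, hcase⟩ := List.exists_cons_of_ne_nil hne
      rw [← ht, hcase]; simp
    have hget : text.getD j ' ' = n.toList.headD ' ' := by
      have h1 : (text.drop j).head? = text[j]? := List.head?_drop
      have h2 : text[j]? = some text[j] := List.getElem?_eq_getElem hj
      have h3 : text.getD j ' ' = text[j] := List.getD_eq_getElem text ' ' hj
      rw [h3]
      have : some text[j] = n.toList.head? := by rw [← h2, ← h1, hhead]
      obtain ⟨c, cs, hcase⟩ := List.exists_cons_of_ne_nil hne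
      rw [hcase] at this ⊢
      simp only [List.head?_cons, Option.some.injEq] at this
      simpa using this
    refine ⟨j, hj, ?_, (PySem.Chars.startswith_iff _ _).mpr hpre⟩
    rw [hget]
    exact byFirst_complete n hn

-- For trigger names, membership in the final matched set is Python's 'name in content_lower'.
theorem contains_matched (content : String) (n : String) (hn : n ∈ trigNames) :
    PySem.Set.contains
        ((List.range (PySem.Str.lower content).toList.length).foldl
          (scanPos (PySem.Str.lower content).toList) PySem.Set.empty) n =
      PySem.Str.isIn n (PySem.Str.lower content) := by
  set text := (PySem.Str.lower content).toList with htext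
  rw [Bool.eq_iff_iff, PySem.Set.contains_iff, PySem.Str.isIn_iff_infix,
    ← PySem.Chars.isIn_iff_infix, mem_scan]
  exact scan_matches_isIn text n hn

-- ===== VERDICT (by name: the statement is the Claim_ definition above) =====
theorem extract_teams_py_spec : Claim_equal_extract_teams_py := by
  intro content _
  unfold Spec_extract_teams_py
  have hA : extract_teams_py content =
      teamGroups.filterMap
        (fun g => if g.2.any (fun n => PySem.Str.isIn n (PySem.Str.lower content))
                  then some g.1 else none) := by
    unfold extract_teams_py
    have h := foldA_groups (fun n => PySem.Str.isIn n (PySem.Str.lower content))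
      teamGroups [] codes_nodup (by simp)
    rw [flat_groups] at h
    simpa [stepA] using h
  rw [hA]
  unfold extract_teams_py_alt
  apply List.filterMap_congr
  intro g hg
  rw [any_congr_mem
    (fun n hn => (contains_matched content n (groups_names_sub g hg n hn)).symm)]
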